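-- pv_equiv track=rewrite | github.com/luuck25/DSA-Python | SlidingWindow/ MaximumSumDistinctSubarrays.py | maximumSubarraySum_self
-- ===== SOURCE A (Python) =====
-- from typing import List
--
-- def maximumSubarraySum_self(nums: List[int], k: int) -> int:
--     elements = set()
--     left = 0
--     result = 0
--     curr_sum = 0
--
--     for right in range(len(nums)):
--         while nums[right] in elements:
--             curr_sum -= nums[left]
--             elements.remove(nums[left])
--             left += 1
--
--         elements.add(nums[right])
--
--         if len(elements) > k:
--             curr_sum -= nums[left]
--             elements.remove(nums[left])
--             left += 1
--
--         curr_sum += nums[right]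
--
--         if len(elements) == k:
--             result = max(result, curr_sum)
--
--     return result
-- ===== SOURCE B (Python) =====
-- from typing import List
--
-- def maximumSubarraySum_self(nums: List[int], k: int) -> int:
--     result = 0
--     if k > 0:
--         for i in range(len(nums) - k + 1):
--             window = nums[i:i + k]
--             if len(set(window)) == k:
--                 result = max(result, sum(window))
--     return result
-- ===== Notes on version B (the rewrite author's own statement) =====
-- stated objective: simpler
-- what changed: Replaces the stateful single-pass sliding window (set membership, shrinking left pointer, running sum, size cap) with an independent re-scan of every length-k slice, checking distinctness with set() and summing directly.
import Mathlib
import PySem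

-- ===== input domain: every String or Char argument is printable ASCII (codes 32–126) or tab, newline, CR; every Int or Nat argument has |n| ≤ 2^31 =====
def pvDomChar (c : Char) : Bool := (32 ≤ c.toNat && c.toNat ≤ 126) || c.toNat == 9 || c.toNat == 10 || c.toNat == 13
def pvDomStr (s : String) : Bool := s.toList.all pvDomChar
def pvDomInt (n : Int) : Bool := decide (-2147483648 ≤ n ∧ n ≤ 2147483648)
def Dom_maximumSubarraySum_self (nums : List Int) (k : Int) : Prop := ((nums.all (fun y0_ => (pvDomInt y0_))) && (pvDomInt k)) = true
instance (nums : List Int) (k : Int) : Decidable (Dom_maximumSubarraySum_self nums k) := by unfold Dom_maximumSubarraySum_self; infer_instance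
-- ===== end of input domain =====

-- B replaces A's stateful sliding window by a plain re-scan of every length-k slice (simpler, not faster).

-- ===== PORT A =====
-- the 'while nums[right] in elements' loop; fuel = len(elements) suffices (each pass removes
-- one element).  Python's elements.remove(nums[left]) is ported as Set.discard: in every state
-- the loop reaches, nums[left] is a member of elements, so remove never raises and equals discard.
def pvWhileA (nums : List Int) (x : Int) : Nat → PySem.Set Int × Int × Int → PySem.Set Int × Int × Int
  | 0, st => st
  | fuel+1, (elements, left, curr_sum) =>
    if PySem.Set.contains elements x then
      let v := PySem.List.pyGetD nums left 0
      pvWhileA nums x fuel (PySem.Set.discard elements v, left + 1, curr_sum - v)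
    else (elements, left, curr_sum)

-- loop body of A; state = (elements, left, result, curr_sum)
def pvStepA (nums : List Int) (k : Int) (st : PySem.Set Int × Int × Int × Int) (right : Int) :
    PySem.Set Int × Int × Int × Int :=
  let x := PySem.List.pyGetD nums right 0
  let w := pvWhileA nums x st.1.length (st.1, st.2.1, st.2.2.2)
  let elements := PySem.Set.add w.1 x
  let s2 := if k < (elements.length : Int) then
      let v := PySem.List.pyGetD nums w.2.1 0
      (PySem.Set.discard elements v, w.2.1 + 1, w.2.2 - v)
    else (elements, w.2.1, w.2.2)
  let curr_sum := s2.2.2 + x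
  let result := if (s2.1.length : Int) = k then max st.2.2.1 curr_sum else st.2.2.1
  (s2.1, s2.2.1, result, curr_sum)

def maximumSubarraySum_self (nums : List Int) (k : Int) : Int :=
  ((PySem.List.pyRange 0 (nums.length : Int)).foldl (pvStepA nums k)
    (PySem.Set.empty, 0, 0, 0)).2.2.1

-- ===== PORT B =====
def maximumSubarraySum_self_alt (nums : List Int) (k : Int) : Int :=
  if 0 < k then
    (PySem.List.pyRange 0 ((nums.length : Int) - k + 1)).foldl (fun result i =>
      let window := PySem.List.slice nums (some i) (some (i + k))
      if ((PySem.Set.ofList window).length : Int) = k then max result window.sum else result) 0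
  else 0

-- ===== PRECONDITION & SPEC =====
def Spec_maximumSubarraySum_self (nums : List Int) (k : Int) (out : Int) : Prop := out = maximumSubarraySum_self_alt nums k
instance (nums : List Int) (k : Int) (out : Int) : Decidable (Spec_maximumSubarraySum_self nums k out) := by unfold Spec_maximumSubarraySum_self; infer_instance

-- ===== CLAIM (what is proved, stated in full; the proofs are below) =====
def Claim_equal_maximumSubarraySum_self : Prop := ∀ (nums : List Int) (k : Int), Dom_maximumSubarraySum_self nums k → Spec_maximumSubarraySum_self nums k (maximumSubarraySum_self nums k)

-- ===== LEMMAS AND PROOFS =====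
def pvWin (nums : List Int) (l p : Nat) : List Int := (nums.drop l).take (p - l)

lemma pvWin_cons (nums : List Int) (l p : Nat) (h1 : l < p) (h2 : p ≤ nums.length) :
    pvWin nums l p = nums.getD l 0 :: pvWin nums (l+1) p := by
  have hl : l < nums.length := by omega
  unfold pvWin
  rw [List.drop_eq_getElem_cons hl, List.getD_eq_getElem nums 0 hl]
  have : p - l = (p - (l+1)) + 1 := by omega
  rw [this, List.take_succ_cons]

lemma pvWin_snoc (nums : List Int) (l p : Nat) (_h1 : l ≤ p) (h2 : p < nums.length) :
    pvWin nums l (p+1) = pvWin nums l p ++ [nums.getD p 0] := by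
  unfold pvWin
  have : p + 1 - l = (p - l) + 1 := by omega
  rw [this, List.take_add_one]
  congr 1
  rw [List.getElem?_drop]
  have hp : l + (p - l) < nums.length := by omega
  rw [List.getElem?_eq_getElem hp, List.getD_eq_getElem nums 0 (by omega : p < nums.length)]
  simp
  congr 1; omega

lemma pvWin_drop (nums : List Int) (b a p : Nat) (h : b ≤ a) :
    pvWin nums a p = (pvWin nums b p).drop (a - b) := by
  unfold pvWin
  rw [List.drop_take, List.drop_drop]
  congr 1
  · omega
  · congr 1; omega

lemma pvDiscard_not_mem (s : List Int) (x : Int) (h : x ∉ s) : PySem.Set.discard s x = s := by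
  unfold PySem.Set.discard
  apply List.filter_eq_self.mpr
  intro y hy
  exact bne_iff_ne.mpr (fun hh => h (hh ▸ hy))

lemma pvDiscard_cons (t : List Int) (v : Int) (h : v ∉ t) :
    PySem.Set.discard (v :: t) v = t := by
  unfold PySem.Set.discard
  rw [List.filter_cons_of_neg (by simp)]
  exact pvDiscard_not_mem t v h

lemma pvFoldlAdd (xs : List Int) : ∀ (s : List Int), ∃ t, xs.foldl PySem.Set.add s = s ++ t ∧ t.Sublist xs := by
  induction xs with
  | nil => intro s; exact ⟨[], by simp⟩
  | cons x xs ih =>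
    intro s
    simp only [List.foldl_cons]
    by_cases hx : x ∈ s
    · have hadd : PySem.Set.add s x = s := by simp [PySem.Set.add, PySem.Set.contains, hx]
      rw [hadd]
      obtain ⟨t, ht, hs⟩ := ih s
      exact ⟨t, ht, hs.cons x⟩
    · have hadd : PySem.Set.add s x = s ++ [x] := by simp [PySem.Set.add, PySem.Set.contains, hx]
      rw [hadd]
      obtain ⟨t, ht, hs⟩ := ih (s ++ [x])
      exact ⟨x :: t, by rw [ht, List.append_assoc]; rfl, hs.cons₂ x⟩

lemma pvOfList_sublist (xs : List Int) : (PySem.Set.ofList xs).Sublist xs := by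
  obtain ⟨t, ht, hs⟩ := pvFoldlAdd xs []
  simpa [PySem.Set.ofList, PySem.Set.empty, ht] using hs


lemma pvWin_len (nums : List Int) (l p : Nat) (_h1 : l ≤ p) (h2 : p ≤ nums.length) :
    (pvWin nums l p).length = p - l := by
  simp [pvWin]; omega

lemma pvWhileA_spec (nums : List Int) (x : Int) :
    ∀ (fuel l p : Nat), l ≤ p → p ≤ nums.length → p - l ≤ fuel → (pvWin nums l p).Nodup →
    ∃ l', l ≤ l' ∧ l' ≤ p ∧ x ∉ pvWin nums l' p ∧ (l < l' → nums.getD (l'-1) 0 = x) ∧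
      pvWhileA nums x fuel (pvWin nums l p, (l:Int), (pvWin nums l p).sum)
        = (pvWin nums l' p, (l':Int), (pvWin nums l' p).sum) := by
  intro fuel
  induction fuel with
  | zero =>
    intro l p h1 h2 h3 hnd
    have hlp : l = p := by omega
    refine ⟨l, le_refl l, by omega, ?_, by omega, rfl⟩
    subst hlp; simp [pvWin]
  | succ f ih =>
    intro l p h1 h2 h3 hnd
    by_cases hx : x ∈ pvWin nums l p
    · have hlp : l < p := by
        rcases Nat.lt_or_ge l p with h | h
        · exact h
        · exfalso; have : pvWin nums l p = [] := by simp [pvWin]; omega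
          rw [this] at hx; simp at hx
      have hcons := pvWin_cons nums l p hlp h2
      have hvmem : nums.getD l 0 ∉ pvWin nums (l+1) p := by
        rw [hcons] at hnd; exact (List.nodup_cons.mp hnd).1
      have hdisc : PySem.Set.discard (pvWin nums l p) (nums.getD l 0) = pvWin nums (l+1) p := by
        rw [hcons]; exact pvDiscard_cons _ _ hvmem
      have hsum : (pvWin nums l p).sum - nums.getD l 0 = (pvWin nums (l+1) p).sum := by
        rw [hcons]; simp
      have hcast : (l:Int) + 1 = ((l+1:Nat):Int) := by push_cast; ring
      have hstep : pvWhileA nums x (f+1) (pvWin nums l p, (l:Int), (pvWin nums l p).sum)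
          = pvWhileA nums x f (pvWin nums (l+1) p, ((l+1:Nat):Int), (pvWin nums (l+1) p).sum) := by
        simp only [pvWhileA]
        rw [if_pos (by simp [PySem.Set.contains]; exact hx), PySem.List.pyGetD_natCast]
        show pvWhileA nums x f (PySem.Set.discard (pvWin nums l p) (nums.getD l 0), (l:Int) + 1,
          (pvWin nums l p).sum - nums.getD l 0) = _
        rw [hdisc, hsum, hcast]
      obtain ⟨l', ha, hb, hc, hd, he⟩ := ih (l+1) p (by omega) h2 (by omega)
        (by rw [hcons] at hnd; exact (List.nodup_cons.mp hnd).2)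
      refine ⟨l', by omega, hb, hc, ?_, by rw [hstep, he]⟩
      intro _
      rcases Nat.lt_or_ge (l+1) l' with hlt | hge
      · exact hd hlt
      · have : l' = l + 1 := by omega
        subst this
        simp only [Nat.add_sub_cancel]
        rw [hcons] at hx
        rcases List.mem_cons.mp hx with h | h
        · exact h.symm
        · exact absurd h hc
    · refine ⟨l, le_refl l, h1, hx, by omega, ?_⟩
      simp only [pvWhileA]
      rw [if_neg (by simp [PySem.Set.contains]; exact hx)]

lemma pvWin_suffix (nums : List Int) (b a p : Nat) (h : b ≤ a) :
    (pvWin nums a p).IsSuffix (pvWin nums b p) := by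
  rw [pvWin_drop nums b a p h]; exact List.drop_suffix _ _

lemma pvLen_eq_iff (nums : List Int) (K : Nat) (q l : Nat)
    (hl : l ≤ q) (hq : q ≤ nums.length) (hlen : q - l ≤ K) (hnd : (pvWin nums l q).Nodup)
    (hP3 : l = 0 ∨ q - l = K ∨ nums.getD (l-1) 0 ∈ pvWin nums l q) :
    q - l = K ↔ (K ≤ q ∧ (pvWin nums (q - K) q).Nodup) := by
  constructor
  · intro h
    have hlq : l = q - K := by omega
    exact ⟨by omega, by rw [← hlq]; exact hnd⟩
  · rintro ⟨hKq, hndK⟩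
    by_contra hne
    have hlgt : q - K < l := by omega
    have hl1 : 1 ≤ l := by omega
    rcases hP3 with h0 | hK' | hmem
    · omega
    · omega
    · -- nums[l-1] ∈ win l q, but win (l-1) q = nums[l-1] :: win l q is nodup (suffix of win (q-K) q)
      have hcons := pvWin_cons nums (l-1) q (by omega) hq
      have hsuf := pvWin_suffix nums (q - K) (l-1) q (by omega)
      have hnd1 : (pvWin nums (l-1) q).Nodup := hndK.sublist hsuf.sublist
      rw [hcons] at hnd1
      have : l - 1 + 1 = l := by omega
      rw [this] at hnd1
      exact (List.nodup_cons.mp hnd1).1 hmem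

def pvResAt (nums : List Int) (K p : Nat) : Int :=
  (List.range (p + 1 - K)).foldl (fun r i =>
    if (pvWin nums i (i + K)).Nodup then max r (pvWin nums i (i + K)).sum else r) 0

lemma pvResAt_succ (nums : List Int) (K p : Nat) (_hK : 1 ≤ K) :
    pvResAt nums K (p+1) =
      if K ≤ p+1 ∧ (pvWin nums (p+1-K) (p+1)).Nodup
      then max (pvResAt nums K p) (pvWin nums (p+1-K) (p+1)).sum
      else pvResAt nums K p := by
  by_cases hKp : K ≤ p + 1
  · have hr : p + 1 + 1 - K = (p + 1 - K) + 1 := by omega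
    have hik : p + 1 - K + K = p + 1 := by omega
    unfold pvResAt
    rw [hr, List.range_succ, List.foldl_append]
    simp only [List.foldl_cons, List.foldl_nil, hik]
    by_cases hnd : (pvWin nums (p+1-K) (p+1)).Nodup
    · rw [if_pos hnd, if_pos ⟨hKp, hnd⟩]
    · rw [if_neg hnd, if_neg (by tauto)]
  · have h1 : p + 1 + 1 - K = 0 := by omega
    have h2 : p + 1 - K = 0 := by omega
    rw [if_neg (by tauto)]
    unfold pvResAt
    rw [h1, h2]


def pvGoodA (nums : List Int) (K p : Nat) (st : PySem.Set Int × Int × Int × Int) : Prop :=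
  ∃ l : Nat, l ≤ p ∧ p - l ≤ K ∧ (pvWin nums l p).Nodup ∧
    (l = 0 ∨ p - l = K ∨ nums.getD (l-1) 0 ∈ pvWin nums l p) ∧
    st = (pvWin nums l p, (l : Int), pvResAt nums K p, (pvWin nums l p).sum)

lemma pvStepA_good (nums : List Int) (K : Nat) (hK : 1 ≤ K) (p : Nat) (hp : p < nums.length)
    (st : PySem.Set Int × Int × Int × Int) (h : pvGoodA nums K p st) :
    pvGoodA nums K (p+1) (pvStepA nums (K:Int) st (p:Int)) := by
  obtain ⟨l, hl, hlen, hnd, hP3, hst⟩ := h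
  subst hst
  have hpn : p ≤ nums.length := le_of_lt hp
  obtain ⟨l', ha, hb, hc, hd, he⟩ :=
    pvWhileA_spec nums (nums.getD p 0) (p - l) l p hl hpn (le_refl _) hnd
  have hlenE : (pvWin nums l p).length = p - l := pvWin_len nums l p hl hpn
  have hsnoc : pvWin nums l' (p+1) = pvWin nums l' p ++ [nums.getD p 0] := pvWin_snoc nums l' p hb hp
  have hndl' : (pvWin nums l' p).Nodup := hnd.sublist (pvWin_suffix nums l l' p ha).sublist
  have hnd1 : (pvWin nums l' (p+1)).Nodup := by
    rw [hsnoc]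
    exact hndl'.append (List.nodup_singleton _)
      (by intro a haa hab; simp at hab; subst hab; exact hc haa)
  have hadd : PySem.Set.add (pvWin nums l' p) (nums.getD p 0) = pvWin nums l' (p+1) := by
    simp only [PySem.Set.add, PySem.Set.contains]
    rw [if_neg (by simpa using hc), ← hsnoc]
  have hlen1 : (pvWin nums l' (p+1)).length = p + 1 - l' :=
    pvWin_len nums l' (p+1) (by omega) (by omega)
  have hsum1 : (pvWin nums l' (p+1)).sum = (pvWin nums l' p).sum + nums.getD p 0 := by
    rw [hsnoc]; simp
  unfold pvStepA
  simp only [PySem.List.pyGetD_natCast]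
  rw [hlenE, he]
  simp only
  rw [hadd, hlen1]
  by_cases hbump : K < p + 1 - l'
  · -- window grew past k: pop nums[left]
    have hKeq : p + 1 - l' = K + 1 := by omega
    have hcons2 : pvWin nums l' (p+1) = nums.getD l' 0 :: pvWin nums (l'+1) (p+1) :=
      pvWin_cons nums l' (p+1) (by omega) (by omega)
    have hnd2 : (pvWin nums (l'+1) (p+1)).Nodup := by
      rw [hcons2] at hnd1; exact (List.nodup_cons.mp hnd1).2
    have hdisc2 : PySem.Set.discard (pvWin nums l' (p+1)) (nums.getD l' 0)
        = pvWin nums (l'+1) (p+1) := by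
      rw [hcons2]
      exact pvDiscard_cons _ _ (by rw [hcons2] at hnd1; exact (List.nodup_cons.mp hnd1).1)
    rw [if_pos (by exact_mod_cast hbump)]
    simp only [PySem.List.pyGetD_natCast]
    rw [hdisc2]
    have hlen2 : (pvWin nums (l'+1) (p+1)).length = K :=
      (pvWin_len nums (l'+1) (p+1) (by omega) (by omega)).trans (by omega)
    rw [hlen2, if_pos rfl]
    have hcs : (pvWin nums l' p).sum - nums.getD l' 0 + nums.getD p 0
        = (pvWin nums (l'+1) (p+1)).sum := by
      have e2 : (pvWin nums l' (p+1)).sum = nums.getD l' 0 + (pvWin nums (l'+1) (p+1)).sum := by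
        rw [hcons2]; simp
      omega
    have hidx : p + 1 - K = l' + 1 := by omega
    have hres : pvResAt nums K (p+1) = max (pvResAt nums K p) (pvWin nums (l'+1) (p+1)).sum := by
      rw [pvResAt_succ nums K p hK, hidx, if_pos ⟨by omega, hnd2⟩]
    refine ⟨l'+1, by omega, by omega, hnd2, Or.inr (Or.inl (by omega)), ?_⟩
    rw [hcs, hres]
    refine Prod.ext rfl (Prod.ext (by push_cast; ring) (Prod.ext rfl rfl))
  · -- window still within k
    have hnb : p + 1 - l' ≤ K := by omega
    rw [if_neg (by exact_mod_cast hbump)]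
    simp only
    rw [hlen1]
    have hP3new : l' = 0 ∨ (p+1) - l' = K ∨ nums.getD (l'-1) 0 ∈ pvWin nums l' (p+1) := by
      rcases Nat.lt_or_ge l l' with hmov | hstay
      · right; right
        rw [hd hmov, hsnoc]; simp
      · have hll : l' = l := by omega
        subst hll
        rcases hP3 with h0 | hKe | hmem
        · exact Or.inl h0
        · exfalso; omega
        · right; right; rw [hsnoc]; exact List.mem_append_left _ hmem
    have hiff := pvLen_eq_iff nums K (p+1) l' (by omega) (by omega) hnb hnd1 hP3new
    have hresr := pvResAt_succ nums K p hK
    refine ⟨l', by omega, hnb, hnd1, hP3new, ?_⟩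
    by_cases hcond : p + 1 - l' = K
    · have hKle : K ≤ p + 1 ∧ (pvWin nums (p+1-K) (p+1)).Nodup := hiff.mp hcond
      have hidx : p + 1 - K = l' := by omega
      rw [if_pos (by exact_mod_cast hcond)]
      rw [hresr, if_pos hKle, hidx, hsum1]
    · rw [if_neg (by exact_mod_cast hcond)]
      have hncond : ¬ (K ≤ p+1 ∧ (pvWin nums (p+1-K) (p+1)).Nodup) := fun hh => hcond (hiff.mpr hh)
      rw [hresr, if_neg hncond, hsum1]



lemma pvOfList_len_iff (xs : List Int) : (PySem.Set.ofList xs).length = xs.length ↔ xs.Nodup := by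
  constructor
  · intro h
    have := List.Sublist.eq_of_length (pvOfList_sublist xs) h
    rw [← this]; exact PySem.Set.nodup_ofList xs
  · intro h; rw [PySem.Set.ofList_eq_self_of_nodup xs h]

lemma pvA_eq_resAt (nums : List Int) (K : Nat) (hK : 1 ≤ K) :
    maximumSubarraySum_self nums (K:Int) = pvResAt nums K nums.length := by
  have haux : ∀ p, p ≤ nums.length →
      pvGoodA nums K p ((List.range p).foldl (fun st (r : Nat) => pvStepA nums (K:Int) st (r:Int))
        (PySem.Set.empty, 0, 0, 0)) := by
    intro p
    induction p with
    | zero =>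
      intro _
      refine ⟨0, le_refl 0, by omega, by simp [pvWin], Or.inl rfl, ?_⟩
      have h0 : 1 - K = 0 := by omega
      simp [pvWin, pvResAt, h0, PySem.Set.empty]
    | succ p ih =>
      intro hpn
      rw [List.range_succ, List.foldl_append]
      simp only [List.foldl_cons, List.foldl_nil]
      exact pvStepA_good nums K hK p (by omega) _ (ih (by omega))
  obtain ⟨l, _, _, _, _, hst⟩ := haux nums.length (le_refl _)
  unfold maximumSubarraySum_self
  rw [PySem.List.pyRange_zero_natCast, List.foldl_map]
  rw [hst]

lemma pvB_eq_resAt (nums : List Int) (K : Nat) (hK : 1 ≤ K) :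
    maximumSubarraySum_self_alt nums (K:Int) = pvResAt nums K nums.length := by
  unfold maximumSubarraySum_self_alt
  rw [if_pos (by exact_mod_cast hK)]
  by_cases hKn : K ≤ nums.length
  · have hcast : (nums.length : Int) - (K:Int) + 1 = ((nums.length - K + 1 : Nat) : Int) := by
      omega
    rw [hcast, PySem.List.pyRange_zero_natCast, List.foldl_map]
    have hr : nums.length - K + 1 = nums.length + 1 - K := by omega
    rw [hr]
    unfold pvResAt
    apply PySem.List.foldl_congr_mem
    intro acc i hi
    have hin : i < nums.length + 1 - K := List.mem_range.mp hi
    have hik : i + K ≤ nums.length := by omega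
    have hcast2 : ((i:Int) + (K:Int)) = ((i + K : Nat) : Int) := by push_cast; ring
    rw [hcast2, PySem.List.slice_natCast]
    have hw : List.take (i + K - i) (List.drop i nums) = pvWin nums i (i + K) := rfl
    rw [hw]
    have hwl : (pvWin nums i (i + K)).length = K := by
      rw [pvWin_len nums i (i+K) (by omega) hik]; omega
    by_cases hnd : (pvWin nums i (i + K)).Nodup
    · rw [if_pos (by exact_mod_cast ((pvOfList_len_iff _).mpr hnd).trans hwl), if_pos hnd]
    · have hne : ¬ (((PySem.Set.ofList (pvWin nums i (i+K))).length : Int) = (K:Int)) := by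
        intro hcontra
        have hlen : (PySem.Set.ofList (pvWin nums i (i+K))).length = K := by exact_mod_cast hcontra
        exact hnd ((pvOfList_len_iff _).mp (hlen.trans hwl.symm))
      rw [if_neg hne, if_neg hnd]
  · have hneg : (nums.length : Int) - (K:Int) + 1 ≤ 0 := by
      have := Nat.lt_of_not_le hKn; omega
    have hres : nums.length + 1 - K = 0 := by omega
    unfold pvResAt
    rw [hres, PySem.List.pyRange_one_eq_nil hneg]
    simp

lemma pvB_nonpos (nums : List Int) (k : Int) (hk : k ≤ 0) :
    maximumSubarraySum_self_alt nums k = 0 := by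
  unfold maximumSubarraySum_self_alt
  rw [if_neg (by omega)]

lemma pvA_nonpos (nums : List Int) (k : Int) (hk : k ≤ 0) :
    maximumSubarraySum_self nums k = 0 := by
  have haux : ∀ p : Nat, ((List.range p).foldl (fun st (r : Nat) => pvStepA nums k st (r:Int))
      (PySem.Set.empty, 0, 0, 0)) = ([], (p:Int), 0, 0) := by
    intro p
    induction p with
    | zero => simp [PySem.Set.empty]
    | succ p ih =>
      rw [List.range_succ, List.foldl_append]
      simp only [List.foldl_cons, List.foldl_nil]
      rw [ih]
      unfold pvStepA
      simp only [List.length_nil, pvWhileA]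
      have hadd : PySem.Set.add ([] : PySem.Set Int) (PySem.List.pyGetD nums (p:Int) 0)
          = [PySem.List.pyGetD nums (p:Int) 0] := by
        simp [PySem.Set.add, PySem.Set.contains]
      rw [hadd]
      rw [if_pos (by simp; omega)]
      have hdisc : PySem.Set.discard [PySem.List.pyGetD nums (p:Int) 0]
          (PySem.List.pyGetD nums (p:Int) 0) = ([] : PySem.Set Int) := by
        simp [PySem.Set.discard]
      rw [hdisc]
      simp only [List.length_nil]
      have : (0 : Int) - PySem.List.pyGetD nums (p:Int) 0 + PySem.List.pyGetD nums (p:Int) 0 = 0 := by ring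
      rw [this]
      split_ifs <;> push_cast <;> simp
  unfold maximumSubarraySum_self
  rw [PySem.List.pyRange_zero_natCast, List.foldl_map, haux]

-- ===== VERDICT (by name: the statement is the Claim_ definition above) =====
theorem maximumSubarraySum_self_spec : Claim_equal_maximumSubarraySum_self := by
  intro nums k _
  unfold Spec_maximumSubarraySum_self
  by_cases hk : 1 ≤ k
  · have hK : k = (k.toNat : Int) := by omega
    rw [hK, pvA_eq_resAt nums k.toNat (by omega), pvB_eq_resAt nums k.toNat (by omega)]
  · rw [pvA_nonpos nums k (by omega), pvB_nonpos nums k (by omega)]
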